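-- pv_equiv track=rewrite | github.com/danielchao0214/NLP-CSE354-HW3-ProbabilisticLanguageModel | a3_chao_112412719.py | extractUnigram
-- ===== SOURCE A (Python) =====
-- def extractUnigram(data, frequent_words):
--     unigramCounts = {}
--     for sentence in data:
--         for i in range(0, len(sentence)):
--             word = sentence[i]
--             if(word in frequent_words):
--                 unigramCounts[word] = unigramCounts[word]+1 if word in unigramCounts else 1
--             else:
--                 unigramCounts["<OOV>"] = unigramCounts["<OOV>"]+1 if "<OOV>" in unigramCounts else 1
--     return unigramCounts
-- ===== SOURCE B (Python) =====
-- def extractUnigram(data, frequent_words):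
--     # pass 1: frequency table of every raw word
--     counts = {}
--     for sentence in data:
--         for word in sentence:
--             counts[word] = counts.get(word, 0) + 1
--     # pass 2: bucket the table itself
--     freq = set(frequent_words)
--     result = {}
--     for word, count in counts.items():
--         if word in freq:
--             result[word] = count
--         else:
--             result["<OOV>"] = result.get("<OOV>", 0) + count
--     return result
-- ===== Notes on version B (the rewrite author's own statement) =====
-- stated objective: alternative
-- what changed: B separates counting from bucketing: a first pass builds a complete raw-word frequency table, then a second loop over that table's (word,count) items keeps frequent entries and folds non-frequent counts into the '<OOV>' bucket, instead of A's single interleaved per-token membership-test-and-increment loop.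
-- outside the precondition, e.g. on extractUnigram([['x', '<OOV>']], {'<OOV>'}): A returns {'<OOV>': 2}, B returns {'<OOV>': 1}
import Mathlib
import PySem

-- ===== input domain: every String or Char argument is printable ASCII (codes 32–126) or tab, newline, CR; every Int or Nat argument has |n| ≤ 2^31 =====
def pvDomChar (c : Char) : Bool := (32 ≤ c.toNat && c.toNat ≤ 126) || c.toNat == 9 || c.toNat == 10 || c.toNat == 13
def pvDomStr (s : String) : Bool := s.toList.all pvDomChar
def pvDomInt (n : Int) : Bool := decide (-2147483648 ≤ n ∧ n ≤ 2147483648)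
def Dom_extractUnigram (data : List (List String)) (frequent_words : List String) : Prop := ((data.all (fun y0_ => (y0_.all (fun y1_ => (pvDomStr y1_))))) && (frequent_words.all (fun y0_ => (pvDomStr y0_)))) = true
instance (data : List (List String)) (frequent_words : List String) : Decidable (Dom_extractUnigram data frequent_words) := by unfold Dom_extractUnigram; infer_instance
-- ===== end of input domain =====

-- B separates counting from bucketing: one pass builds the full raw-word frequency table,
-- a second loop over that table's items keeps frequent entries and folds the rest into "<OOV>" (alternative decomposition).

-- ===== PORT A =====
def extractUnigram (data : List (List String)) (frequent_words : List String) : List (String × Int) :=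
  data.foldl (fun unigramCounts sentence =>
    (PySem.List.pyRange 0 (sentence.length : Int) 1).foldl (fun unigramCounts i =>
      let word := PySem.List.pyGetD sentence i ""
      if frequent_words.contains word then
        if unigramCounts.contains word then unigramCounts.insert word (unigramCounts.getD word 0 + 1)
        else unigramCounts.insert word 1
      else
        if unigramCounts.contains "<OOV>" then unigramCounts.insert "<OOV>" (unigramCounts.getD "<OOV>" 0 + 1)
        else unigramCounts.insert "<OOV>" 1) unigramCounts) (PySem.Dict.empty : PySem.Dict String Int) |>.items

-- ===== PORT B =====
def extractUnigram_alt (data : List (List String)) (frequent_words : List String) : List (String × Int) :=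
  -- pass 1: frequency table of every raw word
  let counts : PySem.Dict String Int :=
    data.foldl (fun counts sentence =>
      sentence.foldl (fun counts word => counts.insert word (counts.getD word 0 + 1)) counts)
      PySem.Dict.empty
  -- pass 2: bucket the table itself
  let freq : PySem.Set String := PySem.Set.ofList frequent_words
  let result : PySem.Dict String Int :=
    counts.items.foldl (fun result wc =>
      if PySem.Set.contains freq wc.1 then result.insert wc.1 wc.2
      else result.insert "<OOV>" (result.getD "<OOV>" 0 + wc.2)) PySem.Dict.empty
  result.items

-- ===== PRECONDITION & SPEC =====
-- Pre_ excludes inputs in which the literal sentinel string "<OOV>" is both a frequent word and a token of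
-- data: there the sentinel collides with the OOV bucket, A silently merges the token's count into the bucket
-- and B's table pass keeps only one of the two — both behaviours are accidents of the sentinel choice and
-- neither is specified.
def Pre_extractUnigram (data : List (List String)) (frequent_words : List String) : Prop :=
  "<OOV>" ∈ frequent_words → ∀ sentence ∈ data, "<OOV>" ∉ sentence
instance (data : List (List String)) (frequent_words : List String) : Decidable (Pre_extractUnigram data frequent_words) := by unfold Pre_extractUnigram; infer_instance
def pvWitness_extractUnigram : List (List String) × List String := ([["a", "b", "a"]], ["a"])

def Spec_extractUnigram (data : List (List String)) (frequent_words : List String) (out : List (String × Int)) : Prop := out = extractUnigram_alt data frequent_words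
instance (data : List (List String)) (frequent_words : List String) (out : List (String × Int)) : Decidable (Spec_extractUnigram data frequent_words out) := by unfold Spec_extractUnigram; infer_instance

-- ===== CLAIM (what is proved, stated in full; the proofs are below) =====
def Claim_equal_extractUnigram : Prop := ∀ (data : List (List String)) (frequent_words : List String), Dom_extractUnigram data frequent_words → Pre_extractUnigram data frequent_words → Spec_extractUnigram data frequent_words (extractUnigram data frequent_words)

-- ===== LEMMAS AND PROOFS =====

-- the bucket of a raw word
def pvProj (fw : List String) (w : String) : String :=
  if fw.contains w then w else "<OOV>"

-- the insert-based counting step (pass 1 of B, and A's two-branch increment)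
def pvIns (d : PySem.Dict String Int) (x : String) : PySem.Dict String Int :=
  d.insert x (d.getD x 0 + 1)

-- pass 2's step of B, over list membership
def pvStep (fw : List String) (r : PySem.Dict String Int) (p : String × Int) : PySem.Dict String Int :=
  if fw.contains p.1 then r.insert p.1 p.2
  else r.insert "<OOV>" (r.getD "<OOV>" 0 + p.2)

theorem pv_contains_ofList (xs : List String) (y : String) :
    PySem.Set.contains (PySem.Set.ofList xs) y = xs.contains y := by
  by_cases h : y ∈ xs
  · simp [PySem.Set.mem_ofList, h]
  · simp [PySem.Set.mem_ofList, h]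

-- A's two-branch increment of key k equals the unconditional insert-increment
theorem pv_branch_eq (u : PySem.Dict String Int) (k : String) :
    (if u.contains k then u.insert k (u.getD k 0 + 1) else u.insert k 1) = pvIns u k := by
  unfold pvIns
  by_cases h : u.contains k = true
  · simp [h]
  · simp [h, PySem.Dict.getD_of_not_contains]

-- A's inner index loop over a sentence = insert-increment fold over the mapped sentence
theorem pv_inner (fw : List String) (sentence : List String) (u : PySem.Dict String Int) :
    (PySem.List.pyRange 0 (sentence.length : Int) 1).foldl (fun u i =>
      let word := PySem.List.pyGetD sentence i ""
      if fw.contains word then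
        if u.contains word then u.insert word (u.getD word 0 + 1)
        else u.insert word 1
      else
        if u.contains "<OOV>" then u.insert "<OOV>" (u.getD "<OOV>" 0 + 1)
        else u.insert "<OOV>" 1) u
    = (sentence.map (pvProj fw)).foldl pvIns u := by
  rw [PySem.List.foldl_pyRange_zero_pyGetD' sentence "" (fun u word =>
      if fw.contains word then
        if u.contains word then u.insert word (u.getD word 0 + 1)
        else u.insert word 1
      else
        if u.contains "<OOV>" then u.insert "<OOV>" (u.getD "<OOV>" 0 + 1)
        else u.insert "<OOV>" 1) u]
  rw [List.foldl_map]
  induction sentence generalizing u with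
  | nil => rfl
  | cons w ws ih =>
      simp only [List.foldl_cons]
      rw [← ih]
      congr 1
      unfold pvProj
      by_cases h : w ∈ fw <;> simp [h, pv_branch_eq]

-- folding a flatMap = folding sentence by sentence
theorem pv_foldl_flatMap {α β γ : Type} (l : List α) (g : α → List β)
    (f : γ → β → γ) (init : γ) :
    (l.flatMap g).foldl f init = l.foldl (fun a x => (g x).foldl f a) init := by
  induction l generalizing init with
  | nil => rfl
  | cons x xs ih => simp [List.flatMap_cons, List.foldl_append, ih]

-- A's whole nested loop counts the bucketed token stream
theorem pv_a_eq_counter (fw : List String) (data : List (List String)) :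
    data.foldl (fun unigramCounts sentence =>
      (PySem.List.pyRange 0 (sentence.length : Int) 1).foldl (fun unigramCounts i =>
        let word := PySem.List.pyGetD sentence i ""
        if fw.contains word then
          if unigramCounts.contains word then unigramCounts.insert word (unigramCounts.getD word 0 + 1)
          else unigramCounts.insert word 1
        else
          if unigramCounts.contains "<OOV>" then unigramCounts.insert "<OOV>" (unigramCounts.getD "<OOV>" 0 + 1)
          else unigramCounts.insert "<OOV>" 1) unigramCounts) (PySem.Dict.empty : PySem.Dict String Int)
    = PySem.Dict.counter ((data.flatMap id).map (pvProj fw)) := by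
  have h1 : ∀ d : PySem.Dict String Int,
      data.foldl (fun unigramCounts sentence =>
        (PySem.List.pyRange 0 (sentence.length : Int) 1).foldl (fun unigramCounts i =>
          let word := PySem.List.pyGetD sentence i ""
          if fw.contains word then
            if unigramCounts.contains word then unigramCounts.insert word (unigramCounts.getD word 0 + 1)
            else unigramCounts.insert word 1
          else
            if unigramCounts.contains "<OOV>" then unigramCounts.insert "<OOV>" (unigramCounts.getD "<OOV>" 0 + 1)
            else unigramCounts.insert "<OOV>" 1) unigramCounts) d
      = data.foldl (fun a s => (s.map (pvProj fw)).foldl pvIns a) d := by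
    intro d
    induction data generalizing d with
    | nil => rfl
    | cons s ss ih => simp only [List.foldl_cons, pv_inner]
  rw [h1, ← pv_foldl_flatMap data (fun s => s.map (pvProj fw)) pvIns PySem.Dict.empty]
  have h2 : data.flatMap (fun s => s.map (pvProj fw)) = (data.flatMap id).map (pvProj fw) := by
    rw [List.map_flatMap]
    rfl
  rw [h2, ← PySem.Dict.foldl_insert_getD_add_one_eq_counter]
  rfl

-- B's pass 1 builds the raw counter
theorem pv_b_pass1 (data : List (List String)) :
    data.foldl (fun counts sentence =>
      sentence.foldl (fun counts word => counts.insert word (counts.getD word 0 + 1)) counts)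
      (PySem.Dict.empty : PySem.Dict String Int)
    = PySem.Dict.counter (data.flatMap id) := by
  rw [← PySem.Dict.foldl_insert_getD_add_one_eq_counter]
  exact (pv_foldl_flatMap data id (fun d x => d.insert x (d.getD x 0 + 1)) (PySem.Dict.empty : PySem.Dict String Int)).symm

-- pass 2's step, written as a single keyed insert
theorem pv_step_eq (fw : List String) (r : PySem.Dict String Int) (p : String × Int) :
    pvStep fw r p = r.insert (pvProj fw p.1) (if fw.contains p.1 then p.2 else r.getD "<OOV>" 0 + p.2) := by
  unfold pvStep pvProj
  by_cases h : p.1 ∈ fw <;> simp [h]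

-- keys different from k and from "<OOV>" never disturb k
theorem pv_fold_getD_frozen (fw : List String) (P : List (String × Int)) (k : String)
    (hk : k ≠ "<OOV>") (h : ∀ p ∈ P, p.1 ≠ k) (r : PySem.Dict String Int) :
    (P.foldl (pvStep fw) r).getD k 0 = r.getD k 0 := by
  induction P generalizing r with
  | nil => rfl
  | cons p rest ih =>
      simp only [List.foldl_cons]
      rw [ih (fun q hq => h q (List.mem_cons_of_mem _ hq))]
      unfold pvStep
      have hp : p.1 ≠ k := h p (List.mem_cons_self)
      by_cases hc : fw.contains p.1 = true
      · simp only [hc, if_true]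
        exact PySem.Dict.getD_insert_of_ne _ _ _ (Ne.symm hp)
      · simp only [hc, if_false, Bool.false_eq_true]
        exact PySem.Dict.getD_insert_of_ne _ _ _ hk

-- a frequent key gets exactly its table value
theorem pv_fold_getD_freq (fw : List String) (P : List (String × Int)) (k : String) (c : Int)
    (hkf : fw.contains k = true) (hk : k ≠ "<OOV>") (hnd : (P.map Prod.fst).Nodup)
    (hmem : (k, c) ∈ P) (r : PySem.Dict String Int) :
    (P.foldl (pvStep fw) r).getD k 0 = c := by
  induction P generalizing r with
  | nil => cases hmem
  | cons p rest ih =>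
      simp only [List.map_cons, List.nodup_cons] at hnd
      rcases List.mem_cons.mp hmem with heq | hmem'
      · subst heq
        have hfr : ∀ q ∈ rest, q.1 ≠ k := by
          intro q hq h'
          have hm : q.1 ∈ rest.map Prod.fst := List.mem_map_of_mem (f := Prod.fst) hq
          rw [h'] at hm
          exact hnd.1 hm
        simp only [List.foldl_cons]
        rw [pv_fold_getD_frozen fw rest k hk hfr]
        unfold pvStep
        simp only [hkf, if_true]
        exact congrArg (fun d => d) (PySem.Dict.getD_insert_self r _ c 0)
      · simp only [List.foldl_cons]
        exact ih hnd.2 hmem' _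

-- the "<OOV>" entry accumulates the non-frequent table values
theorem pv_fold_getD_oov (fw : List String) (P : List (String × Int))
    (h : ∀ p ∈ P, fw.contains p.1 = true → p.1 ≠ "<OOV>") (r : PySem.Dict String Int) :
    (P.foldl (pvStep fw) r).getD "<OOV>" 0
      = r.getD "<OOV>" 0 + ((P.filter (fun p => !(fw.contains p.1))).map Prod.snd).sum := by
  induction P generalizing r with
  | nil => simp
  | cons p rest ih =>
      simp only [List.foldl_cons]
      rw [ih (fun q hq => h q (List.mem_cons_of_mem _ hq))]
      by_cases hc : fw.contains p.1 = true
      · have hp : p.1 ≠ "<OOV>" := h p (List.mem_cons_self) hc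
        unfold pvStep
        simp only [hc, if_pos]
        rw [PySem.Dict.getD_insert_of_ne _ _ _ (Ne.symm hp)]
        have hm : p.1 ∈ fw := by simpa using hc
        simp [List.filter_cons, hm]
      · unfold pvStep
        simp only [hc]
        rw [if_neg (by simp [hc])]
        rw [PySem.Dict.getD_insert_self r "<OOV>" _ 0]
        have hm : p.1 ∉ fw := by simpa using hc
        simp only [List.filter_cons]
        simp [hm, add_assoc]

-- sum of an equality indicator is a count
theorem pv_sum_indicator (l : List String) (x : String) :
    (l.map (fun k => if x = k then 1 else 0)).sum = l.count x := by
  induction l with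
  | nil => rfl
  | cons a l ih =>
      simp only [List.map_cons, List.sum_cons, List.count_cons, ih]
      by_cases h : x = a
      · subst h; simp [Nat.add_comm]
      · simp [h, Ne.symm h]
      
-- sum of a pointwise sum
theorem pv_sum_map_add (l : List String) (f g : String → Nat) :
    (l.map (fun k => f k + g k)).sum = (l.map f).sum + (l.map g).sum := by
  induction l with
  | nil => rfl
  | cons a l ih => simp [ih]; omega

-- ofList of a snoc
theorem pv_ofList_snoc (xs : List String) (x : String) :
    PySem.Set.ofList (xs ++ [x]) = PySem.Set.add (PySem.Set.ofList xs) x := by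
  rw [PySem.Set.ofList_eq_foldl, PySem.Set.ofList_eq_foldl, List.foldl_append]
  rfl

-- first occurrences of mapped values are determined by first occurrences of raw values
theorem pv_ofList_map (f : String → String) (xs : List String) :
    PySem.Set.ofList (xs.map f) = PySem.Set.ofList ((PySem.Set.ofList xs).map f) := by
  induction xs using List.reverseRecOn with
  | nil => rfl
  | append_singleton xs x ih =>
      rw [List.map_append, List.map_singleton, pv_ofList_snoc, pv_ofList_snoc, ih]
      by_cases h : x ∈ PySem.Set.ofList xs
      · have hadd : PySem.Set.add (PySem.Set.ofList xs) x = PySem.Set.ofList xs := by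
          simp [PySem.Set.add, h]
        rw [hadd]
        have hfx : f x ∈ PySem.Set.ofList ((PySem.Set.ofList xs).map f) := by
          rw [PySem.Set.mem_ofList]
          exact List.mem_map_of_mem h
        simp [PySem.Set.add, hfx]
      · have hadd : PySem.Set.add (PySem.Set.ofList xs) x = PySem.Set.ofList xs ++ [x] := by
          simp [PySem.Set.add, h]
        rw [hadd, List.map_append, List.map_singleton, pv_ofList_snoc]

-- total count of the words of a class = sum of per-distinct-word counts over that class
theorem pv_sum_counts (L : List String) (q : String → Bool) :
    (((PySem.Set.ofList L).filter q).map (fun k => L.count k)).sum = L.countP q := by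
  induction L using List.reverseRecOn with
  | nil => rfl
  | append_singleton L x ih =>
      rw [pv_ofList_snoc, List.countP_append]
      have hcnt : ∀ k, (L ++ [x]).count k = L.count k + (if x = k then 1 else 0) := by
        intro k
        rw [List.count_append]
        simp [List.count_singleton', eq_comm]
      by_cases h : x ∈ PySem.Set.ofList L
      · have hadd : PySem.Set.add (PySem.Set.ofList L) x = PySem.Set.ofList L := by
          simp [PySem.Set.add, h]
        rw [hadd]
        have : (((PySem.Set.ofList L).filter q).map (fun k => (L ++ [x]).count k)).sum
            = (((PySem.Set.ofList L).filter q).map (fun k => L.count k)).sum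
              + (((PySem.Set.ofList L).filter q).map (fun k => if x = k then 1 else 0)).sum := by
          rw [← pv_sum_map_add]
          exact congrArg List.sum (List.map_congr_left (fun a _ => hcnt a))
        rw [this, ih, pv_sum_indicator]
        have hnd : ((PySem.Set.ofList L).filter q).Nodup :=
          (PySem.Set.nodup_ofList L).filter q
        rw [hnd.count]
        by_cases hq : q x = true
        · simp [List.mem_filter, h, hq]
        · simp [List.mem_filter, hq, List.countP_singleton]
      · have hadd : PySem.Set.add (PySem.Set.ofList L) x = PySem.Set.ofList L ++ [x] := by
          simp [PySem.Set.add, h]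
        have hxL : x ∉ L := fun hx => h ((PySem.Set.mem_ofList L x).mpr hx)
        rw [hadd, List.filter_append, List.map_append, List.sum_append]
        have hleft : (((PySem.Set.ofList L).filter q).map (fun k => (L ++ [x]).count k)).sum
            = (((PySem.Set.ofList L).filter q).map (fun k => L.count k)).sum := by
          refine congrArg List.sum (List.map_congr_left ?_)
          intro a ha
          have haL : a ∈ PySem.Set.ofList L := List.mem_of_mem_filter ha
          have hax : x ≠ a := fun hxa => h (hxa ▸ haL)
          rw [hcnt a, if_neg hax, Nat.add_zero]
        rw [hleft, ih]
        have hx1 : (L ++ [x]).count x = 1 := by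
          rw [hcnt x, if_pos rfl, List.count_eq_zero.mpr hxL]
        by_cases hq : q x = true
        · simp [List.filter_singleton, hq, hx1, List.countP_singleton, List.count_eq_zero.mpr hxL]
        · simp [List.filter_singleton, hq, List.countP_singleton]

-- the heart: counting bucketed tokens = bucketing the raw counter
theorem pv_main (fw : List String) (L : List String) (hPre : "<OOV>" ∈ fw → "<OOV>" ∉ L) :
    PySem.Dict.counter (L.map (pvProj fw))
      = (PySem.Dict.counter L).items.foldl (pvStep fw) PySem.Dict.empty := by
  have hfoldkey : ∀ (P : List (String × Int)) (d : PySem.Dict String Int),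
      P.foldl (pvStep fw) d
        = P.foldl (fun r p => r.insert (pvProj fw p.1)
            (if fw.contains p.1 then p.2 else r.getD "<OOV>" 0 + p.2)) d := by
    intro P d
    exact PySem.List.foldl_congr_mem P _ _ d (fun r p _ => pv_step_eq fw r p)
  -- keys agree
  have hPitems : (PySem.Dict.counter L).items
      = (PySem.Set.ofList L).map (fun k => (k, (L.count k : Int))) :=
    PySem.Dict.items_counter L
  have hPfst : ((PySem.Dict.counter L).items.map Prod.fst) = PySem.Set.ofList L := by
    rw [hPitems, List.map_map]
    simp [Function.comp_def]
  have hkeysB : ((PySem.Dict.counter L).items.foldl (pvStep fw) PySem.Dict.empty).keys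
      = PySem.Set.ofList ((PySem.Set.ofList L).map (pvProj fw)) := by
    rw [hfoldkey]
    rw [PySem.Dict.keys_foldl_insert_key]
    have : (PySem.Dict.empty : PySem.Dict String Int).keys = [] := PySem.Dict.keys_empty
    rw [this]
    have hmk : (PySem.Dict.counter L).items.map (fun p => pvProj fw p.1)
        = (PySem.Set.ofList L).map (pvProj fw) := by
      rw [hPitems, List.map_map]
      rfl
    rw [hmk, PySem.Set.ofList_eq_foldl]
    rfl
  have hkeysA : (PySem.Dict.counter (L.map (pvProj fw))).keys
      = PySem.Set.ofList ((PySem.Set.ofList L).map (pvProj fw)) := by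
    rw [PySem.Dict.keys_counter, pv_ofList_map]
  -- per-key facts
  have hnotOOV : ∀ k ∈ PySem.Set.ofList L, k ∈ fw → k ≠ "<OOV>" := by
    intro k hk hkf he
    exact hPre (he ▸ hkf) (he ▸ (PySem.Set.mem_ofList L k).mp hk)
  have hndB : ((PySem.Dict.counter L).items.foldl (pvStep fw) PySem.Dict.empty).keys.Nodup := by
    rw [hfoldkey]
    exact PySem.Dict.nodup_keys_foldl_insert_key _ _ _ _ PySem.Dict.nodup_keys_empty
  apply PySem.Dict.ext
  rw [PySem.Dict.items_eq_map_keys _ (PySem.Dict.nodup_keys_counter _) 0,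
    PySem.Dict.items_eq_map_keys _ hndB 0, hkeysA, hkeysB]
  refine List.map_congr_left ?_
  intro k hk
  have hk' : k ∈ (PySem.Set.ofList L).map (pvProj fw) := (PySem.Set.mem_ofList _ k).mp hk
  rcases List.mem_map.mp hk' with ⟨w, hwD, hwk⟩
  refine Prod.ext rfl ?_
  simp only
  by_cases hwf : fw.contains w = true
  -- frequent key: both sides give L.count w
  · have hwm : w ∈ fw := by simpa using hwf
    have hwOOV : w ≠ "<OOV>" := hnotOOV w hwD hwm
    have hkw : k = w := by rw [← hwk]; unfold pvProj; simp [hwm]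
    subst hkw
    have hA : (PySem.Dict.counter (L.map (pvProj fw))).getD k 0 = ((L.map (pvProj fw)).count k : Int) :=
      PySem.Dict.getD_counter _ _
    have hcount : (L.map (pvProj fw)).count k = L.count k := by
      simp only [List.count, List.countP_map]
      refine List.countP_congr ?_
      intro t ht
      unfold pvProj
      simp only [Function.comp_apply]
      by_cases htm : t ∈ fw
      · simp [htm]
      · have hkm : k ∈ fw := by simpa using hwf
        have htf : ¬ (fw.contains t = true) := by simpa using htm
        simp only [if_neg htf, beq_iff_eq]
        constructor
        · intro he; exact absurd he.symm hwOOV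
        · intro he; exact absurd (he ▸ hkm) htm
    have hB : ((PySem.Dict.counter L).items.foldl (pvStep fw) PySem.Dict.empty).getD k 0
        = (L.count k : Int) := by
      refine pv_fold_getD_freq fw _ k (L.count k : Int) hwf hwOOV ?_ ?_ _
      · rw [hPfst]; exact PySem.Set.nodup_ofList L
      · rw [hPitems]; exact List.mem_map_of_mem hwD
    rw [hA, hB, hcount]
  -- OOV key: both sides give the number of non-frequent tokens
  · have hwm : w ∉ fw := by simpa using hwf
    have hkO : k = "<OOV>" := by rw [← hwk]; unfold pvProj; simp [hwm]
    subst hkO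
    have hA : (PySem.Dict.counter (L.map (pvProj fw))).getD "<OOV>" 0
        = ((L.map (pvProj fw)).count "<OOV>" : Int) := PySem.Dict.getD_counter _ _
    have hcount : (L.map (pvProj fw)).count "<OOV>" = L.countP (fun t => !(fw.contains t)) := by
      simp only [List.count, List.countP_map]
      refine List.countP_congr ?_
      intro t ht
      unfold pvProj
      simp only [Function.comp_apply]
      by_cases htm : t ∈ fw
      · have htO : t ≠ "<OOV>" := fun he => hPre (he ▸ htm) (he ▸ ht)
        simp [htm, htO]
      · simp [htm]
    have hB : ((PySem.Dict.counter L).items.foldl (pvStep fw) PySem.Dict.empty).getD "<OOV>" 0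
        = ((L.countP (fun t => !(fw.contains t))) : Int) := by
      rw [pv_fold_getD_oov fw _ ?hne PySem.Dict.empty]
      case hne =>
        intro p hp hpc
        rw [hPitems] at hp
        rcases List.mem_map.mp hp with ⟨w', hw', rfl⟩
        exact hnotOOV w' hw' (by simpa using hpc)
      rw [PySem.Dict.getD_empty, hPitems, List.filter_map, List.map_map]
      have : (((PySem.Set.ofList L).filter ((fun p => !(fw.contains p.1)) ∘ (fun k => (k, (L.count k : Int))))).map
          (Prod.snd ∘ fun k => (k, (L.count k : Int)))).sum
          = (((PySem.Set.ofList L).filter (fun t => !(fw.contains t))).map (fun k => (L.count k : Int))).sum := rfl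
      rw [this]
      have hcast : (((PySem.Set.ofList L).filter (fun t => !(fw.contains t))).map (fun k => (L.count k : Int))).sum
          = ((((PySem.Set.ofList L).filter (fun t => !(fw.contains t))).map (fun k => L.count k)).sum : Int) := by
        induction ((PySem.Set.ofList L).filter (fun t => !(fw.contains t))) with
        | nil => rfl
        | cons a l ih => simp [ih]
      rw [hcast, pv_sum_counts]
      simp
    rw [hA, hB, hcount]

-- ===== VERDICT (by name: the statement is the Claim_ definition above) =====
theorem extractUnigram_spec : Claim_equal_extractUnigram := by
  intro data frequent_words _ hpre
  unfold Spec_extractUnigram extractUnigram extractUnigram_alt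
  have hL : "<OOV>" ∈ frequent_words → "<OOV>" ∉ data.flatMap id := by
    intro hf h
    rcases List.mem_flatMap.mp h with ⟨s, hs, hin⟩
    exact hpre hf s hs hin
  refine congrArg PySem.Dict.items ?_
  rw [pv_a_eq_counter, pv_b_pass1, pv_main frequent_words (data.flatMap id) hL]
  refine PySem.List.foldl_congr_mem _ _ _ _ ?_
  intro r p _
  unfold pvStep
  rw [pv_contains_ofList]
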